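-- pv_equiv track=rewrite | github.com/Cayson-S/COA-SHAP | COA.py | gfpoly_add
-- ===== SOURCE A (Python) =====
-- from typing import Callable, List, Sequence, Tuple
--
-- def gfpoly_add(f1: Sequence[int], f2: Sequence[int], s: int) -> List[int]:
--     """
--     Polynomial addition over GF(s). Coefficients highest->lowest.
--     Pads shorter list on the front (higher degrees) with zeros to match lengths.
--     """
--     l1 = len(f1)
--     l2 = len(f2)
--     if l1 < l2:
--         f1 = [0] * (l2 - l1) + list(f1)
--     elif l2 < l1:
--         f2 = [0] * (l1 - l2) + list(f2)
--     f = [(int(a) + int(b)) % s for a, b in zip(f1, f2)]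
--     return f
-- ===== SOURCE B (Python) =====
-- def gfpoly_add(f1, f2, s):
--     """Polynomial addition over GF(s), coefficients highest->lowest.
--     Accumulates both polynomials into a degree->coefficient dictionary
--     (degree read off by enumerating the reversed list), then emits the
--     summed coefficient mod s for every degree below the max length."""
--     deg = {}
--     for poly in (f1, f2):
--         for d, c in enumerate(reversed(poly)):
--             deg[d] = deg.get(d, 0) + int(c)
--     n = max(len(f1), len(f2))
--     out = [deg.get(d, 0) % s for d in range(n)]
--     out.reverse()
--     return out
-- ===== Notes on version B (the rewrite author's own statement) =====
-- stated objective: alternative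
-- what changed: B replaces A's pad-then-zip elementwise pass by a sparse representation: it accumulates both polynomials into a degree->coefficient dictionary (degrees from enumerating the reversed lists) and then reads the dictionary back out degree by degree mod s.
import Mathlib
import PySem

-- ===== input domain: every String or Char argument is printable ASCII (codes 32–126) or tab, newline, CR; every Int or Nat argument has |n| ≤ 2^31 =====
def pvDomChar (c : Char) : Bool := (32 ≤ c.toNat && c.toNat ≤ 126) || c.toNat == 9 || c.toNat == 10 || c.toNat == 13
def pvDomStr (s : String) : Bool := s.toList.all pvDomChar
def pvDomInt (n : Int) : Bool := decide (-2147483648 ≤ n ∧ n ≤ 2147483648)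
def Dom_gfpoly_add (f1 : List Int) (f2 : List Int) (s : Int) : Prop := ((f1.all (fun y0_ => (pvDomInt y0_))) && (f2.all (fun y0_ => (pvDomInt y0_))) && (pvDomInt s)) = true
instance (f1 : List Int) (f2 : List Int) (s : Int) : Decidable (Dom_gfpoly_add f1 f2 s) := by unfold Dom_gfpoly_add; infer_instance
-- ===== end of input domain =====

-- B replaces A's pad-then-zip pass by a degree->coefficient dictionary built from
-- both polynomials and read back out degree by degree (objective: alternative); equal return value.

-- ===== PORT A =====
def gfpoly_add (f1 : List Int) (f2 : List Int) (s : Int) : List Int :=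
  let l1 := f1.length
  let l2 := f2.length
  let f1' := if l1 < l2 then List.replicate (l2 - l1) 0 ++ f1 else f1
  let f2' := if l2 < l1 then List.replicate (l1 - l2) 0 ++ f2 else f2
  (f1'.zip f2').map (fun ab => PySem.Int.mod (ab.1 + ab.2) s)

-- ===== PORT B =====
-- the inner loop: for d, c in enumerate(reversed(poly)): deg[d] = deg.get(d, 0) + c
def gfpoly_add_accum (d : PySem.Dict Int Int) (poly : List Int) : PySem.Dict Int Int :=
  (PySem.List.enumerate poly.reverse 0).foldl
    (fun dd p => dd.insert p.1 (dd.getD p.1 0 + p.2)) d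

def gfpoly_add_alt (f1 : List Int) (f2 : List Int) (s : Int) : List Int :=
  let deg := [f1, f2].foldl gfpoly_add_accum PySem.Dict.empty
  let n : Int := max (f1.length : Int) (f2.length : Int)
  let out := (PySem.List.pyRange 0 n 1).map (fun d => PySem.Int.mod (deg.getD d 0) s)
  out.reverse

-- ===== PRECONDITION & SPEC =====
-- Pre_ excludes exactly the inputs where Python's '%' raises ZeroDivisionError in both
-- programs: s = 0 with at least one nonempty polynomial (with both empty, no '%' runs).
def Pre_gfpoly_add (f1 : List Int) (f2 : List Int) (s : Int) : Prop := s ≠ 0 ∨ (f1 = [] ∧ f2 = [])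
instance (f1 : List Int) (f2 : List Int) (s : Int) : Decidable (Pre_gfpoly_add f1 f2 s) := by unfold Pre_gfpoly_add; infer_instance
def pvWitness_gfpoly_add : List Int × List Int × Int := ([1, 2, 3], [4, 5], 7)

def Spec_gfpoly_add (f1 : List Int) (f2 : List Int) (s : Int) (out : List Int) : Prop := out = gfpoly_add_alt f1 f2 s
instance (f1 : List Int) (f2 : List Int) (s : Int) (out : List Int) : Decidable (Spec_gfpoly_add f1 f2 s out) := by unfold Spec_gfpoly_add; infer_instance

-- ===== CLAIM (what is proved, stated in full; the proofs are below) =====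
def Claim_equal_gfpoly_add : Prop := ∀ (f1 : List Int) (f2 : List Int) (s : Int), Dom_gfpoly_add f1 f2 s → Pre_gfpoly_add f1 f2 s → Spec_gfpoly_add f1 f2 s (gfpoly_add f1 f2 s)

-- ===== LEMMAS AND PROOFS =====

-- the coefficient of degree k stored for one polynomial (xs given low->high)
def coefLow (xs : List Int) (k : Int) : Int :=
  if h : 0 ≤ k ∧ k.toNat < xs.length then xs[k.toNat] else 0

-- a fold of 'deg[k] = deg.get(k, 0) + v' adds, per key, the sum of matching values
theorem getD_foldl_insert_add (l : List (Int × Int)) (d : PySem.Dict Int Int) (k : Int) :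
    (l.foldl (fun dd p => dd.insert p.1 (dd.getD p.1 0 + p.2)) d).getD k 0
      = d.getD k 0 + ((l.filter (fun p => p.1 == k)).map Prod.snd).sum := by
  induction l generalizing d with
  | nil => simp
  | cons p t ih =>
    simp only [List.foldl_cons, ih, List.filter_cons]
    by_cases h : p.1 = k
    · subst h
      simp [PySem.Dict.getD_insert_self]
      ring
    · rw [PySem.Dict.getD_insert, if_neg (fun hk => h hk.symm)]
      simp [h]

-- the per-degree sum contributed by enumerating one list from start s0
theorem sum_filter_enumerate (xs : List Int) (s0 k : Int) :
    (((PySem.List.enumerate xs s0).filter (fun p => p.1 == k)).map Prod.snd).sum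
      = (if h : s0 ≤ k ∧ (k - s0).toNat < xs.length then xs[(k - s0).toNat] else 0) := by
  induction xs generalizing s0 with
  | nil => simp
  | cons x t ih =>
    rw [PySem.List.enumerate_cons, List.filter_cons]
    by_cases h : s0 = k
    · subst h
      have : ∀ p ∈ PySem.List.enumerate t (s0 + 1), ¬ (p.1 == s0) = true := by
        intro p hp
        rcases (PySem.List.mem_enumerate_iff _ _ _).1 hp with ⟨j, hj, rfl⟩
        simp; omega
      rw [List.filter_eq_nil_iff.2 this]
      simp
    · simp only [beq_iff_eq, h, if_false, ih]
      by_cases hc : s0 + 1 ≤ k ∧ (k - (s0 + 1)).toNat < t.length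
      · rw [dif_pos hc, dif_pos (by constructor <;> [omega; (simp; omega)])]
        have h1 : (k - s0).toNat = (k - (s0 + 1)).toNat + 1 := by omega
        simp [h1]
      · rw [dif_neg hc, dif_neg (by simp; omega)]

-- one accumulation pass adds coefLow of the (reversed) polynomial at every key
theorem getD_accum (d : PySem.Dict Int Int) (poly : List Int) (k : Int) :
    (gfpoly_add_accum d poly).getD k 0 = d.getD k 0 + coefLow poly.reverse k := by
  rw [gfpoly_add_accum, getD_foldl_insert_add, sum_filter_enumerate]
  unfold coefLow
  congr 1
  by_cases h : 0 ≤ k ∧ k.toNat < poly.reverse.length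
  · rw [dif_pos (by omega), dif_pos h]
    congr 1; omega
  · rw [dif_neg (by omega), dif_neg h]

-- the padded list of A, at position j of N, is the low-order coefficient of degree N-1-j
theorem padded_getElem (xs : List Int) (N j : Nat) (hx : xs.length ≤ N) (hj : j < N) :
    (List.replicate (N - xs.length) (0 : Int) ++ xs)[j]'(by simp; omega) =
      coefLow xs.reverse ((N - 1 - j : Nat) : Int) := by
  unfold coefLow
  by_cases hcase : N - 1 - j < xs.length
  · have hcond : (0:Int) ≤ ((N - 1 - j : Nat) : Int) ∧ (((N - 1 - j : Nat) : Int)).toNat < xs.reverse.length := by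
      constructor
      · positivity
      · simp; omega
    rw [dif_pos hcond]
    rw [List.getElem_append_right (by simp; omega), List.getElem_reverse]
    congr 1; simp; omega
  · rw [dif_neg (by simp; omega), List.getElem_append_left (by simp; omega)]
    simp

theorem core (f1 f2 : List Int) (s : Int) : gfpoly_add f1 f2 s = gfpoly_add_alt f1 f2 s := by
  simp only [gfpoly_add, gfpoly_add_alt, List.foldl_cons, List.foldl_nil]
  set l1 := f1.length with hl1
  set l2 := f2.length with hl2
  set N := max l1 l2 with hN
  have hmax : max (l1 : Int) (l2 : Int) = (N : Int) := by rw [hN, Nat.cast_max]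
  rw [hmax]
  have h1 : l1 ≤ N := le_max_left _ _
  have h2 : l2 ≤ N := le_max_right _ _
  have e1 : (if l1 < l2 then List.replicate (l2 - l1) (0 : Int) ++ f1 else f1) =
      List.replicate (N - l1) (0 : Int) ++ f1 := by
    split_ifs with h
    · congr 2; omega
    · have : N - l1 = 0 := by omega
      rw [this]; simp
  have e2 : (if l2 < l1 then List.replicate (l1 - l2) (0 : Int) ++ f2 else f2) =
      List.replicate (N - l2) (0 : Int) ++ f2 := by
    split_ifs with h
    · congr 2; omega
    · have : N - l2 = 0 := by omega
      rw [this]; simp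
  rw [e1, e2]
  apply List.ext_getElem
  · simp [PySem.List.length_pyRange_one]; omega
  · intro j hj hj'
    have hjN : j < N := by
      have hj2 := hj
      simp only [List.length_map, List.length_zip, List.length_append, List.length_replicate] at hj2
      omega
    have hlen : (PySem.List.pyRange 0 (N : Int) 1).length = N := by
      simp [PySem.List.length_pyRange_one]
    rw [List.getElem_reverse, List.getElem_map, List.getElem_map, List.getElem_zip]
    simp only [List.length_map, hlen]
    rw [PySem.List.getElem_pyRange_one]
    simp only [zero_add]
    rw [getD_accum, getD_accum, PySem.Dict.getD_empty, zero_add]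
    rw [padded_getElem f1 N j h1 hjN, padded_getElem f2 N j h2 hjN]

-- ===== VERDICT (by name: the statement is the Claim_ definition above) =====
theorem gfpoly_add_spec : Claim_equal_gfpoly_add := by
  intro f1 f2 s _ _
  unfold Spec_gfpoly_add
  exact core f1 f2 s
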